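-- pv_equiv track=rewrite | github.com/Pittersss/rc | lab01/deteccao_de_erro/etapa4_1.py | gerar_erro
-- ===== SOURCE A (Python) =====
-- def gerar_erro(quadro_len, n, pos):
--     erro = ""
--     for i in range(quadro_len):
--         if pos <= i < pos + n:
--             erro += "1"
--         else:
--             erro += "0"
--     return erro
-- ===== SOURCE B (Python) =====
-- def gerar_erro(quadro_len, n, pos):
--     L = max(0, quadro_len)
--     start = min(max(pos, 0), L)
--     stop = max(start, min(max(pos + n, 0), L))
--     return "0" * start + "1" * (stop - start) + "0" * (L - stop)
-- ===== Notes on version B (the rewrite author's own statement) =====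
-- stated objective: simpler
-- what changed: Replaces the per-index membership loop with a closed-form concatenation of three repeated-character blocks computed from clamped window bounds.
import Mathlib
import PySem

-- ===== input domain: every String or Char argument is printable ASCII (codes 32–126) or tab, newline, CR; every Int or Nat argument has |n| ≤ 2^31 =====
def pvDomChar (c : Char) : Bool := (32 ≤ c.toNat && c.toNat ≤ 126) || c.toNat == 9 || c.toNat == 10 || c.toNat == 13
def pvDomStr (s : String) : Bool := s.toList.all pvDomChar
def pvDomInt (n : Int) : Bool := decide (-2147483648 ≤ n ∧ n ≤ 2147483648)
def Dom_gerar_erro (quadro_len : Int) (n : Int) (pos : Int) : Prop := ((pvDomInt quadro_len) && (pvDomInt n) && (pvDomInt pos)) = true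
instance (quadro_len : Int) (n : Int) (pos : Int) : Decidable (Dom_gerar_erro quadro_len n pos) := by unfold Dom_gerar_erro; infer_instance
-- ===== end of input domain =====

-- B replaces A's per-index membership loop with a closed-form concatenation of
-- three repeated-character blocks from clamped window bounds (objective: simpler).

-- ===== PORT A =====
def gerar_erro (quadro_len : Int) (n : Int) (pos : Int) : String :=
  (PySem.List.pyRange 0 quadro_len 1).foldl
    (fun erro i => erro ++ (if pos ≤ i ∧ i < pos + n then "1" else "0")) ""

-- ===== PORT B =====
-- "0" * k in Source B with k ≥ 0 is replicate k.toNat (all three counts are nonnegative here)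
def gerar_erro_alt (quadro_len : Int) (n : Int) (pos : Int) : String :=
  let L := max 0 quadro_len
  let start := min (max pos 0) L
  let stop := max start (min (max (pos + n) 0) L)
  String.ofList (List.replicate start.toNat '0') ++
    String.ofList (List.replicate (stop - start).toNat '1') ++
    String.ofList (List.replicate (L - stop).toNat '0')

-- ===== PRECONDITION & SPEC =====
def Spec_gerar_erro (quadro_len : Int) (n : Int) (pos : Int) (out : String) : Prop := out = gerar_erro_alt quadro_len n pos
instance (quadro_len : Int) (n : Int) (pos : Int) (out : String) : Decidable (Spec_gerar_erro quadro_len n pos out) := by unfold Spec_gerar_erro; infer_instance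

-- ===== CLAIM (what is proved, stated in full; the proofs are below) =====
def Claim_equal_gerar_erro : Prop := ∀ (quadro_len : Int) (n : Int) (pos : Int), Dom_gerar_erro quadro_len n pos → Spec_gerar_erro quadro_len n pos (gerar_erro quadro_len n pos)

-- ===== LEMMAS AND PROOFS =====

-- A's loop, started from any accumulated character list, appends the mapped window bits.
theorem pvFoldl_eq (n pos : Int) (rng : List Int) (s : List Char) :
    rng.foldl (fun erro i => erro ++ (if pos ≤ i ∧ i < pos + n then "1" else "0")) (String.ofList s)
      = String.ofList (s ++ rng.map (fun i => if pos ≤ i ∧ i < pos + n then '1' else '0')) := by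
  induction rng generalizing s with
  | nil => simp
  | cons a t ih =>
    by_cases h : pos ≤ a ∧ a < pos + n
    · simpa [h, List.foldl_cons] using ih (s ++ ['1'])
    · simpa [h, List.foldl_cons] using ih (s ++ ['0'])

-- The mapped window bits over range are exactly the three replicate blocks.
theorem pvBlocks (quadro_len n pos : Int) :
    (List.range (max 0 quadro_len).toNat).map
        (fun k : Nat => if pos ≤ (k : Int) ∧ (k : Int) < pos + n then '1' else '0')
      = List.replicate (min (max pos 0) (max 0 quadro_len)).toNat '0' ++
        List.replicate ((max (min (max pos 0) (max 0 quadro_len)) (min (max (pos + n) 0) (max 0 quadro_len))) - (min (max pos 0) (max 0 quadro_len))).toNat '1' ++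
        List.replicate ((max 0 quadro_len) - (max (min (max pos 0) (max 0 quadro_len)) (min (max (pos + n) 0) (max 0 quadro_len)))).toNat '0' := by
  set L : Int := max 0 quadro_len with hL
  set a : Int := min (max pos 0) L with ha
  set b : Int := max a (min (max (pos + n) 0) L) with hb
  have h0L : 0 ≤ L := le_max_left _ _
  have h0a : 0 ≤ a := by omega
  have hab : a ≤ b := le_max_left _ _
  have hbL : b ≤ L := by omega
  apply List.ext_getElem
  · simp; omega
  · intro i h1 h2
    have hiL : (i : Int) < L := by simp at h1; omega
    simp only [List.getElem_map, List.getElem_range, List.getElem_append,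
      List.length_append, List.length_replicate, List.getElem_replicate]
    split_ifs <;> first | rfl | (exfalso; omega)

-- ===== VERDICT (by name: the statement is the Claim_ definition above) =====
theorem gerar_erro_spec : Claim_equal_gerar_erro := by
  intro quadro_len n pos _
  show gerar_erro quadro_len n pos = gerar_erro_alt quadro_len n pos
  unfold gerar_erro gerar_erro_alt
  have hrange : PySem.List.pyRange 0 quadro_len 1
      = (List.range (max 0 quadro_len).toNat).map (fun k : Nat => (k : Int)) := by
    rw [PySem.List.pyRange_one]
    have h1 : (quadro_len - 0).toNat = (max 0 quadro_len).toNat := by omega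
    rw [h1]; simp
  have hcomp : ((List.range (max 0 quadro_len).toNat).map (fun k : Nat => (k : Int))).map
        (fun i => if pos ≤ i ∧ i < pos + n then '1' else '0')
      = (List.range (max 0 quadro_len).toNat).map
        (fun k : Nat => if pos ≤ (k : Int) ∧ (k : Int) < pos + n then '1' else '0') := by
    simp [List.map_map, Function.comp_def]
  rw [hrange, show ("" : String) = String.ofList [] from rfl, pvFoldl_eq]
  simp only [List.nil_append]
  rw [hcomp, pvBlocks quadro_len n pos]
  simp [String.ofList_append]
  rw [String.append_assoc]
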